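-- pv_equiv track=rewrite | github.com/dqnykamp/mathinsight | mitesting/utils.py | replace_absolute_value
-- ===== SOURCE A (Python) =====
-- def replace_absolute_value(expression):
--     """
--     Look for combinations of | expr |
--     in nesting group of parenthesis, braces, or brackets
--     (treating all opening (, [, or { as equivalent
--     and all closing ), ], or } as equivalent).
--
--     Ignore case if expr is empty
--
--     If find combination, replace with __Abs__(...)
--
--
--     returns
--     - string with __Abs__()
--
--     """
--
--     paren_stack = []
--     bar_ind = None
--     left_inds=[]
--     right_inds=[]
--
--     for (i,char) in enumerate(expression):
--         if char=='(' or char== "[" or char=="{":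
--             paren_stack.append(bar_ind)
--             bar_ind = None
--         elif char==')' or char=="]" or char=="}":
--             try:
--                 bar_ind = paren_stack.pop()
--             except IndexError:
--                 # unmatched parens.
--                 # Just return expression without modification.
--                 return expression
--
--         elif char=="|":
--             if bar_ind is None:
--                 bar_ind = i
--             elif i > bar_ind+1:
--                 left_inds.append(bar_ind)
--                 right_inds.append(i)
--                 bar_ind = None
--             else:
--                 # ignore ||
--                 bar_ind = None
--
--     if len(paren_stack):
--         # unmatched parens.
--         # Just return expression without modification.
--         return expression
--
--
--     # replace all right_inds with )
--     new_expr_sub=expression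
--     for ind in right_inds:
--         new_expr_sub = new_expr_sub[:ind] + ")" + new_expr_sub[ind+1:]
--
--
--     last_ind=0
--     new_expr=""
--
--     left_inds.sort()
--     for ind in left_inds:
--         new_expr += new_expr_sub[last_ind:ind]
--
--         new_expr += " __Abs__("
--
--         last_ind=ind+1
--
--     new_expr += new_expr_sub[last_ind:]
--
--     return new_expr
-- ===== SOURCE B (Python) =====
-- def replace_absolute_value(expression):
--     """Single-pass rewrite using a stack of per-group output buffers
--     instead of collecting indices and rebuilding the string twice."""
--     stack = []          # saved (parent buffer + open char, parent pending) per open group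
--     buf = ""            # output buffer of the current group
--     pending = None      # (position in buf, original index) of an unmatched bar
--     for i, ch in enumerate(expression):
--         if ch in "([{":
--             stack.append((buf + ch, pending))
--             buf = ""
--             pending = None
--         elif ch in ")]}":
--             if not stack:
--                 # unmatched parens: return expression unmodified
--                 return expression
--             parent, pending = stack.pop()
--             buf = parent + buf + ch
--         elif ch == "|":
--             if pending is None:
--                 pending = (len(buf), i)
--                 buf += ch
--             elif i > pending[1] + 1:
--                 pos = pending[0]
--                 buf = buf[:pos] + " __Abs__(" + buf[pos + 1:] + ")"
--                 pending = None
--             else: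
--                 # ignore ||, keep both bars literal
--                 buf += ch
--                 pending = None
--         else:
--             buf += ch
--     if stack:
--         # unmatched parens: return expression unmodified
--         return expression
--     return buf
-- ===== Notes on version B (the rewrite author's own statement) =====
-- stated objective: alternative
-- what changed: Replaced the two-phase index-collection-then-double-rebuild with a single pass over the string that maintains a stack of per-group output buffers, splicing __Abs__(...) into the current buffer the moment a bar pair closes.
import Mathlib
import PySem

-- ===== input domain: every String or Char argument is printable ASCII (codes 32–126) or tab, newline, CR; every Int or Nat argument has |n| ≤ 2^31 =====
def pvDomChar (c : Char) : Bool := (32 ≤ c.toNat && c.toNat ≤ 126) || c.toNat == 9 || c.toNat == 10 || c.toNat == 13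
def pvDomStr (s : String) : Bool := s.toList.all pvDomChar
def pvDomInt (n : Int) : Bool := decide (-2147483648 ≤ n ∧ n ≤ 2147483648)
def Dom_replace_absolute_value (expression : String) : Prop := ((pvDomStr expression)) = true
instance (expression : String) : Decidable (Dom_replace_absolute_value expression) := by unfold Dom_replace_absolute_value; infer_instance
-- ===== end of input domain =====

-- B replaces A's collect-indices-then-rebuild-twice scheme by a single pass over the string
-- keeping a stack of per-group output buffers and splicing " __Abs__(" / ")" in as soon as a
-- bar pair completes (objective: alternative algorithm of similar cost).

-- ===== PORT A =====
-- A's scan: collect matched-bar index pairs; 'none' = early return (unmatched close paren)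
def pvLoopA : List (Int × Char) → List (Option Int) → Option Int → List Int → List Int →
    Option (List (Option Int) × Option Int × List Int × List Int)
  | [], ps, bi, L, R => some (ps, bi, L, R)
  | (i, c) :: rest, ps, bi, L, R =>
    if c = '(' ∨ c = '[' ∨ c = '{' then
      pvLoopA rest (bi :: ps) none L R
    else if c = ')' ∨ c = ']' ∨ c = '}' then
      match ps with
      | [] => none                       -- paren_stack.pop() raises IndexError → return expression
      | b :: ps' => pvLoopA rest ps' b L R
    else if c = '|' then
      match bi with
      | none => pvLoopA rest ps (some i) L R
      | some b =>
        if i > b + 1 then pvLoopA rest ps none (L ++ [b]) (R ++ [i])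
        else pvLoopA rest ps none L R    -- ignore ||
    else
      pvLoopA rest ps bi L R

def replace_absolute_value (expression : String) : String :=
  let s := expression.toList
  match pvLoopA (PySem.List.enumerate s 0) [] none [] [] with
  | none => expression
  | some (ps, _, L, R) =>
    if ps.length ≠ 0 then expression
    else
      -- replace all right_inds with ')'
      let sub := R.foldl (fun t ind =>
        PySem.List.slice t none (some ind) ++ [')'] ++ PySem.List.slice t (some (ind + 1)) none) s
      -- left pass: left_inds.sort(); insert " __Abs__(" at each left index
      let res := (PySem.List.sorted L (fun x => x)).foldl
        (fun (p : Int × List Char) ind =>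
          (ind + 1, p.2 ++ PySem.List.slice sub (some p.1) (some ind) ++ (" __Abs__(").toList))
        ((0 : Int), [])
      String.ofList (res.2 ++ PySem.List.slice sub (some res.1) none)

-- ===== PORT B =====
-- B's single pass: stack of per-group output buffers, splice on a completed bar pair
def pvLoopB : List (Int × Char) → List (List Char × Option (Int × Int)) → List Char → Option (Int × Int) →
    Option (List (List Char × Option (Int × Int)) × List Char × Option (Int × Int))
  | [], st, buf, pend => some (st, buf, pend)
  | (i, c) :: rest, st, buf, pend =>
    if c = '(' ∨ c = '[' ∨ c = '{' then
      pvLoopB rest ((buf ++ [c], pend) :: st) [] none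
    else if c = ')' ∨ c = ']' ∨ c = '}' then
      match st with
      | [] => none                       -- unmatched close: return expression
      | (parent, pd) :: st' => pvLoopB rest st' (parent ++ buf ++ [c]) pd
    else if c = '|' then
      match pend with
      | none => pvLoopB rest st (buf ++ [c]) (some ((buf.length : Int), i))
      | some (pos, b) =>
        if i > b + 1 then
          pvLoopB rest st
            (PySem.List.slice buf none (some pos) ++ (" __Abs__(").toList ++
              PySem.List.slice buf (some (pos + 1)) none ++ [')']) none
        else pvLoopB rest st (buf ++ [c]) none
    else
      pvLoopB rest st (buf ++ [c]) pend

def replace_absolute_value_alt (expression : String) : String :=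
  let s := expression.toList
  match pvLoopB (PySem.List.enumerate s 0) [] [] none with
  | none => expression
  | some (st, buf, _) =>
    if st.length ≠ 0 then expression
    else String.ofList buf

-- ===== PRECONDITION & SPEC =====
def Spec_replace_absolute_value (expression : String) (out : String) : Prop := out = replace_absolute_value_alt expression
instance (expression : String) (out : String) : Decidable (Spec_replace_absolute_value expression out) := by unfold Spec_replace_absolute_value; infer_instance

-- ===== CLAIM (what is proved, stated in full; the proofs are below) =====
def Claim_equal_replace_absolute_value : Prop := ∀ (expression : String), Dom_replace_absolute_value expression → Spec_replace_absolute_value expression (replace_absolute_value expression)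

-- ===== LEMMAS AND PROOFS =====

-- rendering of a list of (index, char) entries given the final sets of left/right bar indices
def pvRend (L R : List Int) (e : List (Int × Char)) : List Char :=
  e.flatMap (fun p => if p.1 ∈ L then (" __Abs__(").toList else if p.1 ∈ R then [')'] else [p.2])

-- one stored open group: A-side saved bar index, B-side saved buffer/pending, and (proof ghost)
-- the enumerated segment of the group that contains it plus its opening bracket entry
structure PvLv where
  bi : Option Int
  pbuf : List Char
  pd : Option (Int × Int)
  seg : List (Int × Char)
  oi : Int
  oc : Char

-- relation between A's pending bar index and B's pending (buffer position, index) for a segment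
def PvPend (L R : List Int) (seg : List (Int × Char)) : Option Int → Option (Int × Int) → Prop
  | none, none => True
  | some b, some pp => pp.2 = b ∧ b ∉ L ∧ b ∉ R ∧
      ∃ s1 s2, seg = s1 ++ (b, '|') :: s2 ∧ (∀ j ∈ s1.map Prod.fst, j < b) ∧
        pp.1 = ((pvRend L R s1).length : Int)
  | _, _ => False

def pvFlat (lv : List PvLv) : List (Int × Char) :=
  (lv.map (fun e => e.seg ++ [(e.oi, e.oc)])).reverse.flatten

-- the joint loop invariant tying A's state to B's state after consuming the entries u, next index n
def PvInv (n : Int) (u : List (Int × Char)) (ps : List (Option Int)) (bi : Option Int)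
    (L R : List Int) (st : List (List Char × Option (Int × Int))) (buf : List Char)
    (pend : Option (Int × Int)) : Prop :=
  ∃ lv cur,
    ps = lv.map PvLv.bi ∧
    st = lv.map (fun e => (e.pbuf, e.pd)) ∧
    u = pvFlat lv ++ cur ∧
    0 ≤ n ∧
    (∀ j ∈ u.map Prod.fst, 0 ≤ j ∧ j < n) ∧
    (u.map Prod.fst).Nodup ∧
    (L ++ R).Nodup ∧
    (∀ x ∈ L ++ R, x ∈ cur.map Prod.fst ∨ ∃ e ∈ lv, x ∈ e.seg.map Prod.fst) ∧
    (∀ e ∈ lv, e.pbuf = pvRend L R e.seg ++ [e.oc] ∧ PvPend L R e.seg e.bi e.pd) ∧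
    buf = pvRend L R cur ∧
    PvPend L R cur bi pend

theorem pvRend_append (L R : List Int) (e1 e2 : List (Int × Char)) :
    pvRend L R (e1 ++ e2) = pvRend L R e1 ++ pvRend L R e2 := by
  simp [pvRend]

theorem pvRend_congr {L R L' R' : List Int} (e : List (Int × Char))
    (h : ∀ j ∈ e.map Prod.fst, (j ∈ L ↔ j ∈ L') ∧ (j ∈ R ↔ j ∈ R')) :
    pvRend L R e = pvRend L' R' e := by
  unfold pvRend
  apply List.flatMap_congr
  intro p hp
  have hj := h p.1 (List.mem_map.mpr ⟨p, hp, rfl⟩)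
  by_cases h1 : p.1 ∈ L
  · simp [h1, hj.1.mp h1]
  · have h1' : p.1 ∉ L' := fun hc => h1 (hj.1.mpr hc)
    by_cases h2 : p.1 ∈ R
    · simp [h1, h1', h2, hj.2.mp h2]
    · have h2' : p.1 ∉ R' := fun hc => h2 (hj.2.mpr hc)
      simp [h1, h1', h2, h2']


theorem pvRend_single {L R : List Int} {j : Int} {c : Char} (hL : j ∉ L) (hR : j ∉ R) :
    pvRend L R [(j, c)] = [c] := by
  simp [pvRend, hL, hR]

theorem pvFlat_cons (e : PvLv) (lv : List PvLv) :
    pvFlat (e :: lv) = pvFlat lv ++ e.seg ++ [(e.oi, e.oc)] := by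
  simp [pvFlat, List.append_assoc]

theorem pvSeg_sub {lv : List PvLv} {e : PvLv} (he : e ∈ lv) {x : Int}
    (hx : x ∈ e.seg.map Prod.fst) : x ∈ (pvFlat lv).map Prod.fst := by
  induction lv with
  | nil => cases he
  | cons a lv ih =>
    rw [pvFlat_cons]
    rcases List.mem_cons.mp he with h | h
    · subst h; simp [List.mem_append, hx]
    · simp [List.mem_append, ih h]

theorem pvInterior_mem {lv : List PvLv} {cur u : List (Int × Char)} (hu : u = pvFlat lv ++ cur)
    {x : Int} (hx : x ∈ cur.map Prod.fst ∨ ∃ e ∈ lv, x ∈ e.seg.map Prod.fst) :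
    x ∈ u.map Prod.fst := by
  subst hu
  rw [List.map_append, List.mem_append]
  rcases hx with h | ⟨e, he, hx⟩
  · exact Or.inr h
  · exact Or.inl (pvSeg_sub he hx)

theorem pvPend_extend {L R : List Int} {seg : List (Int × Char)} {bi : Option Int}
    {pd : Option (Int × Int)} (h : PvPend L R seg bi pd) (e2 : List (Int × Char)) :
    PvPend L R (seg ++ e2) bi pd := by
  cases bi <;> cases pd
  · trivial
  · simp [PvPend] at h
  · simp [PvPend] at h
  · obtain ⟨h1, h2, h3, s1, s2, hseg, hlt, hpos⟩ := h
    exact ⟨h1, h2, h3, s1, s2 ++ e2, by rw [hseg]; simp, hlt, hpos⟩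

theorem pvInv_not_memLR {n u ps bi L R st buf pend} (h : PvInv n u ps bi L R st buf pend)
    {m : Int} (hm : n ≤ m) : m ∉ L ∧ m ∉ R := by
  obtain ⟨lv, cur, -, -, h3, -, h5, -, -, h8, -⟩ := h
  constructor <;> intro hc
  · have := h5 m (pvInterior_mem h3 (h8 m (by simp [hc])))
    omega
  · have := h5 m (pvInterior_mem h3 (h8 m (by simp [hc])))
    omega

theorem pvInv_not_mem_u {n u ps bi L R st buf pend} (h : PvInv n u ps bi L R st buf pend)
    {m : Int} (hm : n ≤ m) : m ∉ u.map Prod.fst := by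
  obtain ⟨-, -, -, -, -, -, h5, -⟩ := h
  intro hc
  have := h5 m hc
  omega

theorem pvNodup_concat {u : List (Int × Char)} {n : Int} (h6 : (u.map Prod.fst).Nodup)
    (hn : n ∉ u.map Prod.fst) (c : Char) : ((u ++ [(n, c)]).map Prod.fst).Nodup := by
  rw [List.map_append]
  exact List.Nodup.append h6 (List.nodup_singleton n) (by simpa [List.disjoint_left] using hn)

theorem pvBounds_concat {u : List (Int × Char)} {n : Int} (h4 : 0 ≤ n)
    (h5 : ∀ j ∈ u.map Prod.fst, 0 ≤ j ∧ j < n) (c : Char) :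
    ∀ j ∈ (u ++ [(n, c)]).map Prod.fst, 0 ≤ j ∧ j < n + 1 := by
  intro j hj
  rw [List.map_append, List.mem_append] at hj
  rcases hj with hj | hj
  · have := h5 j hj; omega
  · simp at hj; omega

theorem pvInv_init : PvInv 0 [] [] none [] [] [] [] none := by
  exact ⟨[], [], by simp [pvFlat, pvRend, PvPend]⟩

theorem pvInv_open {n u ps bi L R st buf pend} (h : PvInv n u ps bi L R st buf pend) (c : Char) :
    PvInv (n + 1) (u ++ [(n, c)]) (bi :: ps) none L R ((buf ++ [c], pend) :: st) [] none := by
  have hnu := pvInv_not_mem_u h (le_refl n)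
  obtain ⟨lv, cur, h1, h2, h3, h4, h5, h6, h7, h8, h9, h10, h11⟩ := h
  refine ⟨⟨bi, buf ++ [c], pend, cur, n, c⟩ :: lv, [], ?_, ?_, ?_, by omega,
    pvBounds_concat h4 h5 c, pvNodup_concat h6 hnu c, h7, ?_, ?_, by simp [pvRend], trivial⟩
  · simp [h1]
  · simp [h2]
  · rw [pvFlat_cons, h3]; simp [List.append_assoc]
  · intro x hx
    rcases h8 x hx with hx' | ⟨e, he, hx'⟩
    · exact Or.inr ⟨_, List.mem_cons_self, hx'⟩
    · exact Or.inr ⟨e, List.mem_cons_of_mem _ he, hx'⟩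
  · intro e he
    rcases List.mem_cons.mp he with he' | he'
    · subst he'
      exact ⟨by simp [h10], h11⟩
    · exact h9 e he'

theorem pvInv_close {n u ps bi L R st buf pend} (h : PvInv n u ps bi L R st buf pend) (c : Char) :
    match ps, st with
    | [], [] => True
    | b :: ps', (parent, pd) :: st' =>
        PvInv (n + 1) (u ++ [(n, c)]) ps' b L R st' (parent ++ buf ++ [c]) pd
    | _, _ => False := by
  have hnu := pvInv_not_mem_u h (le_refl n)
  have hnLR := pvInv_not_memLR h (le_refl n)
  obtain ⟨lv, cur, h1, h2, h3, h4, h5, h6, h7, h8, h9, h10, h11⟩ := h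
  cases lv with
  | nil => subst h1 h2; trivial
  | cons e lv' =>
    subst h1 h2
    simp only [List.map_cons]
    have he9 := h9 e List.mem_cons_self
    have hint : ∀ x ∈ L ++ R, x ≠ e.oi := by
      intro x hx hxe
      subst hxe
      rw [h3, pvFlat_cons, List.map_append, List.map_append, List.map_append] at h6
      have hd1 := List.disjoint_of_nodup_append h6
      have hd2 := List.disjoint_of_nodup_append h6.of_append_left
      rcases h8 e.oi hx with hcur | ⟨e', he', hx'⟩
      · exact hd1 (List.mem_append.mpr (Or.inr (by simp))) hcur
      · rcases List.mem_cons.mp he' with rfl | he'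
        · exact hd2 (List.mem_append.mpr (Or.inr hx')) (by simp)
        · exact hd2 (List.mem_append.mpr (Or.inl (pvSeg_sub he' hx'))) (by simp)
    have hoiLR : e.oi ∉ L ∧ e.oi ∉ R :=
      ⟨fun hc => hint e.oi (by simp [hc]) rfl, fun hc => hint e.oi (by simp [hc]) rfl⟩
    refine ⟨lv', e.seg ++ [(e.oi, e.oc)] ++ cur ++ [(n, c)], rfl, rfl, ?_, by omega,
      pvBounds_concat h4 h5 c, pvNodup_concat h6 hnu c, h7, ?_, ?_, ?_, ?_⟩
    · rw [h3, pvFlat_cons]; simp [List.append_assoc]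
    · intro x hx
      rcases h8 x hx with hx' | ⟨e', he', hx'⟩
      · exact Or.inl (by simp [List.map_append, hx'])
      · rcases List.mem_cons.mp he' with rfl | he'
        · exact Or.inl (by simp [List.map_append, hx'])
        · exact Or.inr ⟨e', he', hx'⟩
    · intro e' he'
      exact h9 e' (List.mem_cons_of_mem _ he')
    · rw [he9.1, h10]
      rw [pvRend_append, pvRend_append, pvRend_append,
        pvRend_single hoiLR.1 hoiLR.2, pvRend_single hnLR.1 hnLR.2]
    · have := pvPend_extend he9.2 ([(e.oi, e.oc)] ++ cur ++ [(n, c)])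
      simpa [List.append_assoc] using this

theorem pvInv_other {n u ps bi L R st buf pend} (h : PvInv n u ps bi L R st buf pend) (c : Char) :
    PvInv (n + 1) (u ++ [(n, c)]) ps bi L R st (buf ++ [c]) pend := by
  have hnu := pvInv_not_mem_u h (le_refl n)
  have hnLR := pvInv_not_memLR h (le_refl n)
  obtain ⟨lv, cur, h1, h2, h3, h4, h5, h6, h7, h8, h9, h10, h11⟩ := h
  refine ⟨lv, cur ++ [(n, c)], h1, h2, by rw [h3]; simp [List.append_assoc], by omega,
    pvBounds_concat h4 h5 c, pvNodup_concat h6 hnu c, h7, ?_, h9, ?_, pvPend_extend h11 _⟩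
  · intro x hx
    rcases h8 x hx with hx' | he
    · exact Or.inl (by simp [List.map_append, hx'])
    · exact Or.inr he
  · rw [pvRend_append, h10, pvRend_single hnLR.1 hnLR.2]

theorem pvInv_forget {n u ps bi L R st buf pend} (h : PvInv n u ps bi L R st buf pend) :
    PvInv n u ps none L R st buf none := by
  obtain ⟨lv, cur, h1, h2, h3, h4, h5, h6, h7, h8, h9, h10, -⟩ := h
  exact ⟨lv, cur, h1, h2, h3, h4, h5, h6, h7, h8, h9, h10, trivial⟩

theorem pvInv_barNew {n u ps L R st buf} (h : PvInv n u ps none L R st buf none) :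
    PvInv (n + 1) (u ++ [(n, '|')]) ps (some n) L R st (buf ++ ['|'])
      (some ((buf.length : Int), n)) := by
  have hnu := pvInv_not_mem_u h (le_refl n)
  have hnLR := pvInv_not_memLR h (le_refl n)
  obtain ⟨lv, cur, h1, h2, h3, h4, h5, h6, h7, h8, h9, h10, -⟩ := h
  refine ⟨lv, cur ++ [(n, '|')], h1, h2, by rw [h3]; simp [List.append_assoc], by omega,
    pvBounds_concat h4 h5 '|', pvNodup_concat h6 hnu '|', h7, ?_, h9, ?_, ?_⟩
  · intro x hx
    rcases h8 x hx with hx' | he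
    · exact Or.inl (by simp [List.map_append, hx'])
    · exact Or.inr he
  · rw [pvRend_append, h10, pvRend_single hnLR.1 hnLR.2]
  · refine ⟨rfl, hnLR.1, hnLR.2, cur, [], by simp, ?_, by rw [h10]⟩
    intro j hj
    have : j ∈ u.map Prod.fst := by
      rw [h3, List.map_append, List.mem_append]; exact Or.inr hj
    have := h5 j this
    omega

theorem pvInv_pend_align {n u ps bi L R st buf pend} (h : PvInv n u ps bi L R st buf pend) :
    (bi = none ∧ pend = none) ∨ (∃ b pos, bi = some b ∧ pend = some (pos, b)) := by
  obtain ⟨lv, cur, -, -, -, -, -, -, -, -, -, -, hp⟩ := h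
  cases bi with
  | none =>
    cases pend with
    | none => exact Or.inl ⟨rfl, rfl⟩
    | some pp => exact absurd hp (by simp [PvPend])
  | some b =>
    cases pend with
    | none => exact absurd hp (by simp [PvPend])
    | some pp =>
      obtain ⟨h1, -⟩ := hp
      exact Or.inr ⟨b, pp.1, rfl, by rw [← h1]⟩

theorem pvInv_pair {n u ps b L R st buf pos} (h : PvInv n u ps (some b) L R st buf (some (pos, b)))
    (hgt : n > b + 1) :
    PvInv (n + 1) (u ++ [(n, '|')]) ps none (L ++ [b]) (R ++ [n]) st
      (PySem.List.slice buf none (some pos) ++ (" __Abs__(").toList ++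
        PySem.List.slice buf (some (pos + 1)) none ++ [')']) none := by
  have hnu := pvInv_not_mem_u h (le_refl n)
  have hnLR := pvInv_not_memLR h (le_refl n)
  obtain ⟨lv, cur, h1, h2, h3, h4, h5, h6, h7, h8, h9, h10, h11⟩ := h
  obtain ⟨-, hbL, hbR, s1, s2, hcur, hs1lt, hpos0⟩ := h11
  have hpos : pos = ((pvRend L R s1).length : Int) := hpos0
  -- basic index facts
  have hb_cur : b ∈ cur.map Prod.fst := by rw [hcur]; simp
  have hb_u : b ∈ u.map Prod.fst := by
    rw [h3, List.map_append, List.mem_append]; exact Or.inr hb_cur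
  have hbn : b < n := (h5 b hb_u).2
  have hcur_nodup : (cur.map Prod.fst).Nodup := by
    rw [h3, List.map_append] at h6; exact h6.of_append_right
  have hbs2 : b ∉ s2.map Prod.fst := by
    rw [hcur] at hcur_nodup
    simp only [List.map_append, List.map_cons] at hcur_nodup
    have := hcur_nodup.of_append_right
    exact (List.nodup_cons.mp this).1
  have hflat_disj : ∀ x ∈ (pvFlat lv).map Prod.fst, x ∉ cur.map Prod.fst := by
    rw [h3, List.map_append] at h6
    exact fun x hx hc => List.disjoint_of_nodup_append h6 hx hc
  have hlt_u : ∀ j ∈ cur.map Prod.fst, j < n := by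
    intro j hj
    exact (h5 j (by rw [h3, List.map_append, List.mem_append]; exact Or.inr hj)).2
  have hlt_flat : ∀ j ∈ (pvFlat lv).map Prod.fst, j < n := by
    intro j hj
    exact (h5 j (by rw [h3, List.map_append, List.mem_append]; exact Or.inl hj)).2
  -- membership-congruence for index lists avoiding b and n
  have hcongr : ∀ (e : List (Int × Char)), (∀ j ∈ e.map Prod.fst, j ≠ b ∧ j ≠ n) →
      pvRend L R e = pvRend (L ++ [b]) (R ++ [n]) e := by
    intro e he
    apply pvRend_congr
    intro j hj
    obtain ⟨hj1, hj2⟩ := he j hj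
    simp [List.mem_append, hj1, hj2]
  have hbne : b ≠ n := by omega
  refine ⟨lv, cur ++ [(n, '|')], h1, h2, by rw [h3]; simp [List.append_assoc], by omega,
    pvBounds_concat h4 h5 '|', pvNodup_concat h6 hnu '|', ?_, ?_, ?_, ?_, trivial⟩
  · -- Nodup (L ++ [b] ++ (R ++ [n]))
    have h7L : L.Nodup := h7.of_append_left
    have h7R : R.Nodup := h7.of_append_right
    have hdLR := List.disjoint_of_nodup_append h7
    refine List.Nodup.append (List.Nodup.append h7L (List.nodup_singleton b) ?_)
      (List.Nodup.append h7R (List.nodup_singleton n) ?_) ?_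
    · intro a ha hb'; simp at hb'; subst hb'; exact hbL ha
    · intro a ha hn'; simp at hn'; subst hn'; exact hnLR.2 ha
    · intro a ha ha'
      rw [List.mem_append] at ha ha'
      rcases ha with ha | ha <;> rcases ha' with ha' | ha'
      · exact hdLR ha ha'
      · simp at ha'; subst ha'; exact hnLR.1 ha
      · simp at ha; subst ha; exact hbR ha'
      · simp at ha ha'; omega
  · -- interior
    intro x hx
    rw [List.mem_append] at hx
    have hmem : x ∈ L ++ R ∨ x = b ∨ x = n := by
      rcases hx with hx | hx
      · rcases List.mem_append.mp hx with hx | hx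
        · exact Or.inl (List.mem_append.mpr (Or.inl hx))
        · simp at hx; exact Or.inr (Or.inl hx)
      · rcases List.mem_append.mp hx with hx | hx
        · exact Or.inl (List.mem_append.mpr (Or.inr hx))
        · simp at hx; exact Or.inr (Or.inr hx)
    rcases hmem with hx' | hx' | hx'
    · rcases h8 x hx' with hc | he
      · exact Or.inl (by simp [List.map_append, hc])
      · exact Or.inr he
    · subst hx'; exact Or.inl (by simp [List.map_append, hb_cur])
    · subst hx'; exact Or.inl (by simp [List.map_append])
  · -- stored levels
    intro e he
    have hseg_facts : ∀ j ∈ e.seg.map Prod.fst, j ≠ b ∧ j ≠ n := by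
      intro j hj
      have hjf : j ∈ (pvFlat lv).map Prod.fst := pvSeg_sub he hj
      exact ⟨fun hc => hflat_disj j hjf (hc ▸ hb_cur), by have := hlt_flat j hjf; omega⟩
    obtain ⟨hpb, hpd⟩ := h9 e he
    refine ⟨by rw [hpb, hcongr e.seg hseg_facts], ?_⟩
    rcases heb : e.bi with - | bk <;> rcases hed : e.pd with - | pp <;>
      rw [heb, hed] at hpd
    · trivial
    · simp [PvPend] at hpd
    · simp [PvPend] at hpd
    · obtain ⟨q1, q2, q3, s1k, s2k, hsegk, hltk, hposk⟩ := hpd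
      have hbk : bk ∈ e.seg.map Prod.fst := by rw [hsegk]; simp
      have hbkf := hseg_facts bk hbk
      refine ⟨q1, ?_, ?_, s1k, s2k, hsegk, hltk, ?_⟩
      · simp [List.mem_append, q2, hbkf.1]
      · simp [List.mem_append, q3, hbkf.2]
      · rw [hposk]
        have : pvRend L R s1k = pvRend (L ++ [b]) (R ++ [n]) s1k := by
          apply hcongr
          intro j hj
          exact hseg_facts j (by rw [hsegk, List.map_append, List.mem_append]; exact Or.inl hj)
        rw [this]
  · -- the spliced buffer renders the extended segment
    have hs1f : ∀ j ∈ s1.map Prod.fst, j ≠ b ∧ j ≠ n := by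
      intro j hj
      have hjc : j ∈ cur.map Prod.fst := by rw [hcur]; simp [List.map_append]; exact Or.inl (by simpa using hj)
      exact ⟨by have := hs1lt j hj; omega, by have := hlt_u j hjc; omega⟩
    have hs2f : ∀ j ∈ s2.map Prod.fst, j ≠ b ∧ j ≠ n := by
      intro j hj
      have hjc : j ∈ cur.map Prod.fst := by rw [hcur]; simp [List.map_append]; exact Or.inr (Or.inr (by simpa using hj))
      exact ⟨fun hc => hbs2 (hc ▸ hj), by have := hlt_u j hjc; omega⟩
    have hrew : buf = pvRend L R s1 ++ '|' :: pvRend L R s2 := by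
      rw [h10, hcur, pvRend_append]
      simp [pvRend, hbL, hbR]
    have hposnn : (0 : Int) ≤ pos := by rw [hpos]; positivity
    have htn1 : pos.toNat = (pvRend L R s1).length := by rw [hpos]; simp
    have htn2 : (pos + 1).toNat = (pvRend L R s1).length + 1 := by omega
    rw [PySem.List.slice_to _ hposnn, PySem.List.slice_from _ (by omega), htn1, htn2, hrew]
    have hshape : pvRend L R s1 ++ '|' :: pvRend L R s2
        = (pvRend L R s1 ++ ['|']) ++ pvRend L R s2 := by simp
    rw [List.take_left' rfl, hshape, List.drop_left' (by simp)]
    -- right-hand side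
    rw [hcur]
    have : (s1 ++ (b, '|') :: s2) ++ [(n, '|')] = s1 ++ (b, '|') :: (s2 ++ [(n, '|')]) := by simp
    rw [this, pvRend_append]
    have hrc : pvRend (L ++ [b]) (R ++ [n]) ((b, '|') :: (s2 ++ [(n, '|')]))
        = (" __Abs__(").toList ++ pvRend (L ++ [b]) (R ++ [n]) s2 ++ [')'] := by
      have hnb : ¬ n = b := fun hc => hbne hc.symm
      simp [pvRend, hnLR.1, hnb]
    rw [hrc, ← hcongr s1 hs1f, ← hcongr s2 hs2f]
    simp [List.append_assoc]

theorem pvInv_len {n u ps bi L R st buf pend} (h : PvInv n u ps bi L R st buf pend) :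
    ps.length = st.length := by
  obtain ⟨lv, cur, hps, hst, -⟩ := h
  subst hps hst; simp

-- the main simulation: A's loop and B's loop stay related
theorem pvStep {n : Int} {c : Char} {cs : List Char} {u : List (Int × Char)}
    {ps : List (Option Int)} {bi : Option Int} {L R : List Int}
    {st : List (List Char × Option (Int × Int))} {buf : List Char} {pend : Option (Int × Int)}
    (key : match pvLoopA (PySem.List.enumerate cs (n + 1)) ps bi L R,
          pvLoopB (PySem.List.enumerate cs (n + 1)) st buf pend with
      | none, none => True
      | some (ps', bi', L', R'), some (st', buf', pend') =>
          PvInv ((n + 1) + cs.length) ((u ++ [(n, c)]) ++ PySem.List.enumerate cs (n + 1))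
            ps' bi' L' R' st' buf' pend'
      | _, _ => False) :
    match pvLoopA (PySem.List.enumerate cs (n + 1)) ps bi L R,
          pvLoopB (PySem.List.enumerate cs (n + 1)) st buf pend with
      | none, none => True
      | some (ps', bi', L', R'), some (st', buf', pend') =>
          PvInv (n + ((c :: cs).length : Int)) (u ++ (n, c) :: PySem.List.enumerate cs (n + 1))
            ps' bi' L' R' st' buf' pend'
      | _, _ => False := by
  have h1 : (n : Int) + ((c :: cs).length : Int) = (n + 1) + cs.length := by
    simp [List.length_cons]; ring
  have h2 : u ++ (n, c) :: PySem.List.enumerate cs (n + 1)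
      = (u ++ [(n, c)]) ++ PySem.List.enumerate cs (n + 1) := by simp
  rw [h1, h2]; exact key

-- the main simulation: A's loop and B's loop stay related
theorem pvMain : ∀ (cs : List Char) (n : Int) (u : List (Int × Char)) ps bi L R st buf pend,
    PvInv n u ps bi L R st buf pend →
    match pvLoopA (PySem.List.enumerate cs n) ps bi L R,
          pvLoopB (PySem.List.enumerate cs n) st buf pend with
    | none, none => True
    | some (ps', bi', L', R'), some (st', buf', pend') =>
        PvInv (n + cs.length) (u ++ PySem.List.enumerate cs n) ps' bi' L' R' st' buf' pend'
    | _, _ => False := by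
  intro cs
  induction cs with
  | nil =>
    intro n u ps bi L R st buf pend h
    simpa [PySem.List.enumerate_nil, pvLoopA, pvLoopB] using h
  | cons c cs ih =>
    intro n u ps bi L R st buf pend h
    rw [PySem.List.enumerate_cons]
    simp only [pvLoopA, pvLoopB]
    by_cases hop : c = '(' ∨ c = '[' ∨ c = '{'
    · rw [if_pos hop, if_pos hop]
      exact pvStep (ih (n + 1) (u ++ [(n, c)]) _ _ _ _ _ _ _ (pvInv_open h c))
    · rw [if_neg hop, if_neg hop]
      by_cases hcl : c = ')' ∨ c = ']' ∨ c = '}'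
      · rw [if_pos hcl, if_pos hcl]
        have hclose := pvInv_close h c
        cases ps with
        | nil =>
          cases st with
          | nil => trivial
          | cons pr st' => exact absurd hclose (by simp)
        | cons b ps' =>
          cases st with
          | nil => exact absurd hclose (by simp)
          | cons pr st' =>
            obtain ⟨parent, pd⟩ := pr
            exact pvStep (ih (n + 1) (u ++ [(n, c)]) _ _ _ _ _ _ _ hclose)
      · rw [if_neg hcl, if_neg hcl]
        by_cases hbar : c = '|'
        · rw [if_pos hbar, if_pos hbar]
          subst hbar
          rcases pvInv_pend_align h with ⟨hbi, hpend⟩ | ⟨b, pos, hbi, hpend⟩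
          · subst hbi hpend
            dsimp only
            exact pvStep (ih (n + 1) (u ++ [(n, '|')]) _ _ _ _ _ _ _ (pvInv_barNew h))
          · subst hbi hpend
            dsimp only
            by_cases hgt : n > b + 1
            · rw [if_pos hgt, if_pos hgt]
              exact pvStep (ih (n + 1) (u ++ [(n, '|')]) _ _ _ _ _ _ _ (pvInv_pair h hgt))
            · rw [if_neg hgt, if_neg hgt]
              exact pvStep (ih (n + 1) (u ++ [(n, '|')]) _ _ _ _ _ _ _
                (pvInv_forget (pvInv_other h '|')))
        · rw [if_neg hbar, if_neg hbar]
          exact pvStep (ih (n + 1) (u ++ [(n, c)]) _ _ _ _ _ _ _ (pvInv_other h c))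

-- ===== A's two rebuild passes compute pvRend =====

theorem pvDropEnum (t : List Char) (q : Nat) (s : Int) :
    (PySem.List.enumerate t s).drop q = PySem.List.enumerate (t.drop q) (s + q) := by
  induction t generalizing q s with
  | nil => simp [PySem.List.enumerate]
  | cons c t ih =>
    cases q with
    | zero => simp
    | succ q => simp [PySem.List.enumerate_cons, ih]; ring_nf

theorem pvEnumMap (t : List Char) (s : Int) (h : Int × Char → Char) :
    PySem.List.enumerate ((PySem.List.enumerate t s).map h) s
      = (PySem.List.enumerate t s).map (fun p => (p.1, h p)) := by
  induction t generalizing s with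
  | nil => simp [PySem.List.enumerate]
  | cons c t ih => simp [PySem.List.enumerate_cons, ih]

-- a single replacement sub[:ind] + ')' + sub[ind+1:] as a map over the enumeration
theorem pvRepMap (t : List Char) (ind : Int) (h0 : 0 ≤ ind) (hlt : ind < (t.length : Int)) :
    PySem.List.slice t none (some ind) ++ [')'] ++ PySem.List.slice t (some (ind + 1)) none
      = (PySem.List.enumerate t 0).map (fun p => if p.1 = ind then ')' else p.2) := by
  set m := ind.toNat with hmdef
  have hmind : (m : Int) = ind := Int.toNat_of_nonneg h0
  have hmlt : m < t.length := by omega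
  rw [PySem.List.slice_to _ h0, PySem.List.slice_from _ (by omega : (0:Int) ≤ ind + 1),
    show (ind + 1).toNat = m + 1 by omega, ← hmdef]
  conv_rhs => rw [show t = t.take m ++ t.drop m from (List.take_append_drop m t).symm,
    PySem.List.enumerate_append]
  have hstart : (0 : Int) + ((t.take m).length : Int) = (m : Int) := by
    simp [List.length_take]; omega
  rw [hstart, List.drop_eq_getElem_cons hmlt, PySem.List.enumerate_cons,
    List.map_append, List.map_cons]
  have hTake : (PySem.List.enumerate (t.take m) 0).map
      (fun p => if p.1 = ind then ')' else p.2) = t.take m := by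
    have hmem : ∀ p ∈ PySem.List.enumerate (t.take m) 0,
        (fun (p : Int × Char) => if p.1 = ind then ')' else p.2) p = p.2 := by
      intro p hp
      rcases (PySem.List.mem_enumerate_iff _ _ _).mp hp with ⟨k, hk, rfl⟩
      have hk' : k < m := by simp [List.length_take] at hk; omega
      simp only []
      rw [if_neg (by omega)]
    rw [List.map_congr_left hmem, PySem.List.map_snd_enumerate]
  have hDrop : (PySem.List.enumerate (t.drop (m + 1)) ((m : Int) + 1)).map
      (fun p => if p.1 = ind then ')' else p.2) = t.drop (m + 1) := by
    have hmem : ∀ p ∈ PySem.List.enumerate (t.drop (m + 1)) ((m : Int) + 1),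
        (fun (p : Int × Char) => if p.1 = ind then ')' else p.2) p = p.2 := by
      intro p hp
      rcases (PySem.List.mem_enumerate_iff _ _ _).mp hp with ⟨k, hk, rfl⟩
      simp only []
      rw [if_neg (by omega)]
    rw [List.map_congr_left hmem, PySem.List.map_snd_enumerate]
  rw [hTake, hDrop, if_pos hmind]
  simp

theorem pvRightPass (R : List Int) : ∀ (t : List Char), (∀ x ∈ R, 0 ≤ x ∧ x < (t.length : Int)) →
    R.foldl (fun t ind =>
        PySem.List.slice t none (some ind) ++ [')'] ++ PySem.List.slice t (some (ind + 1)) none) t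
      = (PySem.List.enumerate t 0).map (fun p => if p.1 ∈ R then ')' else p.2) := by
  induction R with
  | nil =>
    intro t _
    simp [PySem.List.map_snd_enumerate]
  | cons ind R' ih =>
    intro t hb
    have hind := hb ind List.mem_cons_self
    rw [List.foldl_cons, pvRepMap t ind hind.1 hind.2]
    have hlen : ((PySem.List.enumerate t 0).map
        (fun p => if p.1 = ind then ')' else p.2)).length = t.length := by
      simp [PySem.List.length_enumerate]
    rw [ih _ (by rw [hlen]; exact fun x hx => hb x (List.mem_cons_of_mem _ hx)), pvEnumMap,
      List.map_map]
    apply List.map_congr_left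
    intro p hp
    by_cases h1 : p.1 ∈ R'
    · simp [h1, List.mem_cons]
    · by_cases h2 : p.1 = ind
      · simp [h2, List.mem_cons]
      · simp [h1, h2, List.mem_cons]

theorem pvLeftPass (L' : List Int) : ∀ (t : List Char) (k : Nat) (acc : List Char),
    List.Pairwise (· < ·) L' → (∀ x ∈ L', (k : Int) ≤ x ∧ x < (t.length : Int)) →
    (let r := L'.foldl (fun (p : Int × List Char) ind =>
        (ind + 1, p.2 ++ PySem.List.slice t (some p.1) (some ind) ++ (" __Abs__(").toList))
        (((k : Nat) : Int), acc)
     r.2 ++ PySem.List.slice t (some r.1) none)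
      = acc ++ ((PySem.List.enumerate t 0).drop k).flatMap
          (fun p => if p.1 ∈ L' then (" __Abs__(").toList else [p.2]) := by
  induction L' with
  | nil =>
    intro t k acc _ _
    simp only [List.foldl_nil]
    rw [PySem.List.slice_from _ (by positivity), Int.toNat_natCast]
    have hmem : ∀ p ∈ (PySem.List.enumerate t 0).drop k,
        (fun (p : Int × Char) => if p.1 ∈ ([] : List Int) then (" __Abs__(").toList else [p.2]) p
          = [p.2] := by
      intro p _; simp
    rw [List.flatMap_congr hmem, ← List.map_eq_flatMap, List.map_drop,
      PySem.List.map_snd_enumerate]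
  | cons ind L'' ih =>
    intro t k acc hpw hb
    have hind := hb ind List.mem_cons_self
    have h0ind : (0 : Int) ≤ ind := by omega
    set m := ind.toNat with hmdef
    have hmind : (m : Int) = ind := Int.toNat_of_nonneg h0ind
    have hkm : k ≤ m := by omega
    have hmlt : m < t.length := by omega
    rw [List.foldl_cons]
    have harg : ind + 1 = (((m + 1 : Nat) : Nat) : Int) := by push_cast; omega
    rw [harg]
    rw [ih t (m + 1) (acc ++ PySem.List.slice t (some ((k : Nat) : Int)) (some ind)
        ++ (" __Abs__(").toList) hpw.of_cons ?_]
    · -- reshape the right-hand side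
      have hdk : (PySem.List.enumerate t 0).drop k = PySem.List.enumerate (t.drop k) (k : Int) := by
        rw [pvDropEnum]; simp
      have hdm : (PySem.List.enumerate t 0).drop (m + 1)
          = PySem.List.enumerate (t.drop (m + 1)) ((m + 1 : Nat) : Int) := by
        rw [pvDropEnum]; simp
      rw [hdk, hdm]
      have hsplit : t.drop k = (t.drop k).take (m - k) ++ (t[m] :: t.drop (m + 1)) := by
        conv_lhs => rw [← List.take_append_drop (m - k) (t.drop k)]
        rw [List.drop_drop, show k + (m - k) = m by omega, List.drop_eq_getElem_cons hmlt]
      rw [hsplit, PySem.List.enumerate_append]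
      have hlen2 : (((t.drop k).take (m - k)).length : Int) = ((m - k : Nat) : Int) := by
        simp [List.length_take, List.length_drop]; omega
      rw [List.flatMap_append]
      have hstart : (k : Int) + (((t.drop k).take (m - k)).length : Int) = ((m : Nat) : Int) := by
        rw [hlen2]; omega
      rw [hstart, PySem.List.enumerate_cons]
      -- three pieces
      have hpiece1 : (PySem.List.enumerate ((t.drop k).take (m - k)) (k : Int)).flatMap
          (fun p => if p.1 ∈ ind :: L'' then (" __Abs__(").toList else [p.2])
          = (t.drop k).take (m - k) := by
        have hmem : ∀ p ∈ PySem.List.enumerate ((t.drop k).take (m - k)) (k : Int),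
            (fun (p : Int × Char) => if p.1 ∈ ind :: L'' then (" __Abs__(").toList else [p.2]) p
              = [p.2] := by
          intro p hp
          rcases (PySem.List.mem_enumerate_iff _ _ _).mp hp with ⟨j, hj, rfl⟩
          have hjlt : j < m - k := by
            have := hj; simp [List.length_take, List.length_drop] at this; omega
          have hnotmem : ((k : Int) + j) ∉ ind :: L'' := by
            intro hc
            rcases List.mem_cons.mp hc with hc | hc
            · omega
            · have := List.rel_of_pairwise_cons hpw hc
              omega
          dsimp only
          exact if_neg hnotmem
        rw [List.flatMap_congr hmem, ← List.map_eq_flatMap, PySem.List.map_snd_enumerate]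
      have hpiece2 : (if ((m : Int), t[m]).1 ∈ ind :: L'' then (" __Abs__(").toList
          else [((m : Int), t[m]).2]) = (" __Abs__(").toList := by
        exact if_pos (by simp [hmind])
      have hpiece3 : (PySem.List.enumerate (t.drop (m + 1)) ((m : Int) + 1)).flatMap
          (fun p => if p.1 ∈ ind :: L'' then (" __Abs__(").toList else [p.2])
          = (PySem.List.enumerate (t.drop (m + 1)) ((m + 1 : Nat) : Int)).flatMap
          (fun p => if p.1 ∈ L'' then (" __Abs__(").toList else [p.2]) := by
        have hstarteq : ((m : Int) + 1) = ((m + 1 : Nat) : Int) := by push_cast; ring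
        rw [hstarteq]
        apply List.flatMap_congr
        intro p hp
        rcases (PySem.List.mem_enumerate_iff _ _ _).mp hp with ⟨j, hj, rfl⟩
        have hne : ((m + 1 : Nat) : Int) + j ≠ ind := by omega
        dsimp only
        by_cases hc : ((m + 1 : Nat) : Int) + j ∈ L''
        · rw [if_pos (List.mem_cons_of_mem _ hc), if_pos hc]
        · rw [if_neg ?_, if_neg hc]
          intro hx
          rcases List.mem_cons.mp hx with hx | hx
          · exact hne hx
          · exact hc hx
      rw [List.flatMap_cons, hpiece1, hpiece2, hpiece3]
      have hslice : PySem.List.slice t (some ((k : Nat) : Int)) (some ind)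
          = (t.drop k).take (m - k) := by
        rw [PySem.List.slice_toNat _ (by positivity) h0ind]
        simp [hmdef]
      rw [hslice]
      simp [List.append_assoc]
    · intro x hx
      have hbx := hb x (List.mem_cons_of_mem _ hx)
      have := List.rel_of_pairwise_cons hpw hx
      constructor
      · push_cast; omega
      · exact hbx.2

-- A's whole tail (right pass, sort, left pass) equals pvRend
theorem pvARender (s : List Char) (L R : List Int)
    (hb : ∀ x ∈ L ++ R, 0 ≤ x ∧ x < (s.length : Int)) (hnd : L.Nodup) :
    (let sub := R.foldl (fun t ind =>
        PySem.List.slice t none (some ind) ++ [')'] ++ PySem.List.slice t (some (ind + 1)) none) s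
     let res := (PySem.List.sorted L (fun x => x)).foldl
        (fun (p : Int × List Char) ind =>
          (ind + 1, p.2 ++ PySem.List.slice sub (some p.1) (some ind) ++ (" __Abs__(").toList))
        ((0 : Int), [])
     res.2 ++ PySem.List.slice sub (some res.1) none)
      = pvRend L R (PySem.List.enumerate s 0) := by
  -- the sorted copy of L is strictly increasing (L has no duplicates)
  set L' := L.mergeSort (fun a b => decide (a ≤ b)) with hL'
  have hperm : L'.Perm L := List.mergeSort_perm L _
  have hple : L'.Pairwise (fun a b => a ≤ b) := by
    have := List.pairwise_mergeSort (le := fun (a b : Int) => decide (a ≤ b))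
      (by intro a b c h1 h2; simp at h1 h2 ⊢; omega)
      (by intro a b; simp; omega) L
    simpa using this
  have hndL' : L'.Nodup := hperm.nodup_iff.mpr hnd
  have hplt : L'.Pairwise (· < ·) := by
    have := hple.and hndL'
    exact this.imp (fun h => lt_of_le_of_ne h.1 h.2)
  have hsorted : PySem.List.sorted L (fun x => x) = L' :=
    PySem.List.sorted_eq_of_perm_of_pairwise_lt _ _ _ hperm hplt
  have hbR : ∀ x ∈ R, 0 ≤ x ∧ x < (s.length : Int) := fun x hx =>
    hb x (List.mem_append.mpr (Or.inr hx))
  have hbL : ∀ x ∈ L, 0 ≤ x ∧ x < (s.length : Int) := fun x hx =>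
    hb x (List.mem_append.mpr (Or.inl hx))
  simp only
  rw [pvRightPass R s hbR, hsorted]
  have hsublen : (((PySem.List.enumerate s 0).map
      (fun p => if p.1 ∈ R then ')' else p.2)).length : Int) = (s.length : Int) := by
    simp [PySem.List.length_enumerate]
  have hlp := pvLeftPass L' ((PySem.List.enumerate s 0).map
      (fun p => if p.1 ∈ R then ')' else p.2)) 0 [] hplt ?_
  · rw [show ((0 : Nat) : Int) = (0 : Int) by simp] at hlp
    rw [hlp, List.drop_zero, pvEnumMap, List.flatMap_map]
    simp only [List.nil_append]
    unfold pvRend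
    apply List.flatMap_congr
    intro p _
    dsimp only
    by_cases h1 : p.1 ∈ L
    · rw [if_pos ((hperm.mem_iff).mpr h1), if_pos h1]
    · rw [if_neg (fun hc => h1 ((hperm.mem_iff).mp hc)), if_neg h1]
      by_cases h2 : p.1 ∈ R
      · rw [if_pos h2, if_pos h2]
      · rw [if_neg h2, if_neg h2]
  · intro x hx
    have := hbL x ((hperm.mem_iff).mp hx)
    rw [hsublen]
    constructor
    · simpa using this.1
    · exact this.2

-- ===== VERDICT (by name: the statement is the Claim_ definition above) =====
theorem replace_absolute_value_spec : Claim_equal_replace_absolute_value := by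
  unfold Claim_equal_replace_absolute_value
  intro expression _
  unfold Spec_replace_absolute_value
  unfold replace_absolute_value replace_absolute_value_alt
  dsimp only
  have key := pvMain expression.toList 0 [] [] none [] [] [] [] none pvInv_init
  revert key
  cases eqA : pvLoopA (PySem.List.enumerate expression.toList 0) [] none [] [] with
  | none =>
    cases eqB : pvLoopB (PySem.List.enumerate expression.toList 0) [] [] none with
    | none => intro _; rfl
    | some b => intro key; exact key.elim
  | some a =>
    obtain ⟨ps, bi, L, R⟩ := a
    cases eqB : pvLoopB (PySem.List.enumerate expression.toList 0) [] [] none with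
    | none => intro key; exact key.elim
    | some bb =>
      obtain ⟨st, buf, pend⟩ := bb
      intro key
      simp only [List.nil_append, zero_add] at key
      have hlen := pvInv_len key
      dsimp only
      by_cases hps : ps.length ≠ 0
      · rw [if_pos hps, if_pos (by omega : st.length ≠ 0)]
      · rw [if_neg hps, if_neg (by omega : ¬ st.length ≠ 0)]
        have hps0 : ps = [] := List.length_eq_zero_iff.mp (by omega)
        subst hps0
        obtain ⟨lv, cur, h1, h2, h3, h4, h5, h6, h7, h8, h9, h10, -⟩ := key
        have hlv : lv = [] := by
          cases lv with
          | nil => rfl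
          | cons e lv' => simp at h1
        subst hlv
        have hcur : PySem.List.enumerate expression.toList 0 = cur := by
          simpa [pvFlat] using h3
        have hbnd : ∀ x ∈ L ++ R, 0 ≤ x ∧ x < ((expression.toList).length : Int) := by
          intro x hx
          rcases h8 x hx with hc | ⟨e, he, -⟩
          · have hxu : x ∈ (PySem.List.enumerate expression.toList 0).map Prod.fst := by
              rw [hcur]; exact hc
            exact h5 x hxu
          · cases he
        have hrender := pvARender expression.toList L R hbnd h7.of_append_left
        simp only at hrender ⊢
        rw [hrender]
        rw [h10, ← hcur]
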